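-- pv_equiv track=rewrite | github.com/ljc0311/a4 | src/core/voice_image_sync.py | _group_images_by_voice
-- ===== SOURCE A (Python) =====
-- from typing import Dict, List, Any, Optional, Tuple
--
-- def _group_images_by_voice(voice_segments: List[Dict],
--                           image_requirements: List[Dict]) -> Dict[int, List[Dict]]:
--     """按配音段落组织图像需求"""
--     voice_to_images = {}
--
--     for image_req in image_requirements:
--         voice_idx = image_req.get('voice_segment_index', 0)
--         if voice_idx not in voice_to_images:
--             voice_to_images[voice_idx] = []
--         voice_to_images[voice_idx].append(image_req)
--
--     # 按图像索引排序
--     for voice_idx in voice_to_images: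
--         voice_to_images[voice_idx].sort(key=lambda x: x.get('image_index', 0))
--
--     return voice_to_images
-- ===== SOURCE B (Python) =====
-- def _group_images_by_voice(voice_segments, image_requirements):
--     """按配音段落组织图像需求 — single global stable sort, then one bucketing pass (no per-group sort)."""
--     voice_to_images = {r.get('voice_segment_index', 0): [] for r in image_requirements}
--     for r in sorted(image_requirements, key=lambda x: x.get('image_index', 0)):
--         voice_to_images[r.get('voice_segment_index', 0)].append(r)
--     return voice_to_images
-- ===== Notes on version B (the rewrite author's own statement) =====
-- stated objective: alternative
-- what changed: Instead of bucketing requirements by voice index and then sorting each bucket separately, B seeds the buckets with a dict comprehension and fills them in one pass over a single globally stable-sorted copy of image_requirements, relying on sort stability so no per-group sort is needed.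
import Mathlib
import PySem

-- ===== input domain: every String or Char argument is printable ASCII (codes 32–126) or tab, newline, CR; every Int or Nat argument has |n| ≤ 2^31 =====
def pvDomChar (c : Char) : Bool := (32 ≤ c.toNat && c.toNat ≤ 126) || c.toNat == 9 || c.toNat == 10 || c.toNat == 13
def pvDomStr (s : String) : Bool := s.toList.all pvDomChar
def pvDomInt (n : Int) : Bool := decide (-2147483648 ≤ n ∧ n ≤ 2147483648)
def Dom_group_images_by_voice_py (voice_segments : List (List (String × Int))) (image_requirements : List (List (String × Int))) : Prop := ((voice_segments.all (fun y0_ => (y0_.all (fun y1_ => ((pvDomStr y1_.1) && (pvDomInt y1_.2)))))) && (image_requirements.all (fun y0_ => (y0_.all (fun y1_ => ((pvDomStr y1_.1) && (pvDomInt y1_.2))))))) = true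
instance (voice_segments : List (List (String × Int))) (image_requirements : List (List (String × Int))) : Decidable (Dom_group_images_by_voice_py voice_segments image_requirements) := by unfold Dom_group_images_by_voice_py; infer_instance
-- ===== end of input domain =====

-- B replaces A's bucket-then-sort-each-group scheme by one global stable sort followed by a single
-- bucketing pass (objective: alternative decomposition; same asymptotic cost, no per-group sort).

-- shared key helpers: image_req.get('voice_segment_index', 0) and image_req.get('image_index', 0)
def pvVKey (r : List (String × Int)) : Int := PySem.Dict.getD (PySem.Dict.mk r) "voice_segment_index" 0
def pvIKey (r : List (String × Int)) : Int := PySem.Dict.getD (PySem.Dict.mk r) "image_index" 0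

-- ===== PORT A =====
-- first loop: bucket by voice index (insert empty list on first sight, then append);
-- second loop: for voice_idx in voice_to_images: sort that bucket in place by image_index
def group_images_by_voice_py (voice_segments : List (List (String × Int))) (image_requirements : List (List (String × Int))) : List (Int × List (List (String × Int))) :=
  let d : PySem.Dict Int (List (List (String × Int))) :=
    image_requirements.foldl (fun d image_req =>
      let voice_idx := pvVKey image_req
      let d := if d.contains voice_idx = false then d.insert voice_idx [] else d
      d.modify voice_idx [] (fun l => l ++ [image_req])) PySem.Dict.empty
  let d := d.keys.foldl (fun d voice_idx =>
      d.modify voice_idx [] (fun l => PySem.List.sorted l pvIKey false)) d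
  d.items

-- ===== PORT B =====
-- dict comprehension seeds every voice index with []; then one pass over the globally
-- (stably) sorted requirements appends each into its bucket — no per-group sort
def group_images_by_voice_py_alt (voice_segments : List (List (String × Int))) (image_requirements : List (List (String × Int))) : List (Int × List (List (String × Int))) :=
  let voice_to_images : PySem.Dict Int (List (List (String × Int))) :=
    image_requirements.foldl (fun d r => d.insert (pvVKey r) []) PySem.Dict.empty
  let voice_to_images :=
    (PySem.List.sorted image_requirements pvIKey false).foldl
      (fun d r => d.modify (pvVKey r) [] (fun l => l ++ [r])) voice_to_images
  voice_to_images.items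

-- ===== PRECONDITION & SPEC =====
def Spec_group_images_by_voice_py (voice_segments : List (List (String × Int))) (image_requirements : List (List (String × Int))) (out : List (Int × List (List (String × Int)))) : Prop := out = group_images_by_voice_py_alt voice_segments image_requirements
instance (voice_segments : List (List (String × Int))) (image_requirements : List (List (String × Int))) (out : List (Int × List (List (String × Int)))) : Decidable (Spec_group_images_by_voice_py voice_segments image_requirements out) := by unfold Spec_group_images_by_voice_py; infer_instance

-- ===== CLAIM (what is proved, stated in full; the proofs are below) =====
def Claim_equal_group_images_by_voice_py : Prop := ∀ (voice_segments : List (List (String × Int))) (image_requirements : List (List (String × Int))), Dom_group_images_by_voice_py voice_segments image_requirements → Spec_group_images_by_voice_py voice_segments image_requirements (group_images_by_voice_py voice_segments image_requirements)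

-- ===== LEMMAS AND PROOFS =====

-- A's "insert [] if absent, then append" step is just modify-with-default-[]
theorem pv_stepA_eq (d : PySem.Dict Int (List (List (String × Int)))) (k : Int)
    (f : List (List (String × Int)) → List (List (String × Int))) :
    PySem.Dict.modify (if d.contains k = false then d.insert k [] else d) k [] f
      = d.modify k [] f := by
  by_cases h : d.contains k = false
  · rw [if_pos h]
    simp only [PySem.Dict.modify, PySem.Dict.getD_insert_self, PySem.Dict.insert_insert_self,
      PySem.Dict.getD_of_not_contains d [] h]
  · rw [if_neg h]

theorem pv_foldA_eq (l : List (List (String × Int))) :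
    ∀ d : PySem.Dict Int (List (List (String × Int))),
    l.foldl (fun d image_req =>
      let voice_idx := pvVKey image_req
      let d := if d.contains voice_idx = false then d.insert voice_idx [] else d
      d.modify voice_idx [] (fun l => l ++ [image_req])) d
    = l.foldl (fun d r => d.modify (pvVKey r) [] (fun l => l ++ [r])) d := by
  induction l with
  | nil => intro d; rfl
  | cons x l ih =>
    intro d
    rw [List.foldl_cons, List.foldl_cons]
    show l.foldl _ (PySem.Dict.modify (if d.contains (pvVKey x) = false then d.insert (pvVKey x) [] else d) (pvVKey x) [] (fun l => l ++ [x])) = _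
    rw [pv_stepA_eq]
    exact ih _

-- the append loop: final bucket of c = starting bucket ++ the requirements with voice key c, in order
theorem pv_getD_append_fold (l : List (List (String × Int)))
    (d : PySem.Dict Int (List (List (String × Int)))) (c : Int) :
    (l.foldl (fun d r => d.modify (pvVKey r) [] (fun ls => ls ++ [r])) d).getD c []
      = d.getD c [] ++ l.filter (fun r => pvVKey r == c) := by
  have h := PySem.Dict.getD_foldl_modify_append (l.map (fun r => (pvVKey r, r))) d c
  rw [List.foldl_map] at h
  rw [h]
  simp [List.filter_map, Function.comp_def]

-- B's seeding loop only ever stores [], so every default-[] lookup stays []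
theorem pv_getD_insert_fold_nil (l : List (List (String × Int))) :
    ∀ (d : PySem.Dict Int (List (List (String × Int)))) (c : Int), d.getD c [] = [] →
    (l.foldl (fun d r => d.insert (pvVKey r) []) d).getD c [] = [] := by
  induction l with
  | nil => intro d c h; exact h
  | cons x l ih =>
    intro d c h
    rw [List.foldl_cons]
    refine ih _ _ ?_
    rw [PySem.Dict.getD_insert]
    split_ifs <;> simp [h]

-- A's key-sort loop, lookup characterisations
theorem pv_getD_sort_fold_not_mem (g : List (List (String × Int)) → List (List (String × Int)))
    (l : List Int) :
    ∀ (d : PySem.Dict Int (List (List (String × Int)))) (c : Int), c ∉ l →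
    (l.foldl (fun d k => d.modify k [] g) d).getD c [] = d.getD c [] := by
  induction l with
  | nil => intro d c _; rfl
  | cons k l ih =>
    intro d c hc
    rw [List.foldl_cons, ih _ _ (fun h => hc (List.mem_cons_of_mem _ h)),
      PySem.Dict.getD_modify, if_neg (by intro h; apply hc; rw [h]; exact List.mem_cons_self)]

theorem pv_getD_sort_fold_mem' (g : List (List (String × Int)) → List (List (String × Int)))
    (l : List Int) :
    ∀ (d : PySem.Dict Int (List (List (String × Int)))) (c : Int), l.Nodup → c ∈ l →
    (l.foldl (fun d k => d.modify k [] g) d).getD c [] = g (d.getD c []) := by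
  induction l with
  | nil => intro d c _ hc; cases hc
  | cons k l ih =>
    intro d c hnd hc
    rw [List.foldl_cons]
    rcases List.mem_cons.mp hc with rfl | hc
    · rw [pv_getD_sort_fold_not_mem g l _ _ (List.nodup_cons.mp hnd).1,
        PySem.Dict.getD_modify, if_pos rfl]
    · rw [ih _ _ (List.nodup_cons.mp hnd).2 hc, PySem.Dict.getD_modify,
        if_neg (by intro h; exact (List.nodup_cons.mp hnd).1 (by rw [← h]; exact hc))]

-- stability of the insertion sort: inserting preserves key-sortedness …
theorem pv_pairwise_insertBy (x : List (String × Int)) (ys : List (List (String × Int)))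
    (h : ys.Pairwise (fun a b => pvIKey a ≤ pvIKey b)) :
    (PySem.List.insertBy (fun a b => decide (pvIKey a < pvIKey b)) x ys).Pairwise
      (fun a b => pvIKey a ≤ pvIKey b) := by
  induction ys with
  | nil => simp [PySem.List.insertBy]
  | cons y ys ih =>
    rw [show PySem.List.insertBy (fun a b => decide (pvIKey a < pvIKey b)) x (y :: ys)
        = if decide (pvIKey x < pvIKey y) then x :: y :: ys
          else y :: PySem.List.insertBy (fun a b => decide (pvIKey a < pvIKey b)) x ys from rfl]
    rcases List.pairwise_cons.mp h with ⟨hy, hys⟩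
    split_ifs with hlt
    · refine List.pairwise_cons.mpr ⟨?_, h⟩
      intro z hz
      rcases List.mem_cons.mp hz with rfl | hz
      · exact le_of_lt (of_decide_eq_true hlt)
      · exact le_trans (le_of_lt (of_decide_eq_true hlt)) (hy z hz)
    · refine List.pairwise_cons.mpr ⟨?_, ih hys⟩
      intro z hz
      rcases (PySem.List.mem_insertBy _ x z ys).mp hz with rfl | hz
      · exact le_of_not_gt (fun hgt => hlt (decide_eq_true hgt))
      · exact hy z hz

-- inserting below every element of a key-sorted list puts it in front
theorem pv_insertBy_front (x : List (String × Int)) (zs : List (List (String × Int)))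
    (h : ∀ z ∈ zs, pvIKey x < pvIKey z) :
    PySem.List.insertBy (fun a b => decide (pvIKey a < pvIKey b)) x zs = x :: zs := by
  cases zs with
  | nil => rfl
  | cons z zs =>
    rw [show PySem.List.insertBy (fun a b => decide (pvIKey a < pvIKey b)) x (z :: zs)
        = if decide (pvIKey x < pvIKey z) then x :: z :: zs
          else z :: PySem.List.insertBy (fun a b => decide (pvIKey a < pvIKey b)) x zs from rfl,
      if_pos (decide_eq_true (h z List.mem_cons_self))]

-- … and filtering commutes with inserting into a key-sorted list
theorem pv_filter_insertBy (p : List (String × Int) → Bool) (x : List (String × Int))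
    (ys : List (List (String × Int))) (h : ys.Pairwise (fun a b => pvIKey a ≤ pvIKey b)) :
    (PySem.List.insertBy (fun a b => decide (pvIKey a < pvIKey b)) x ys).filter p
      = if p x then PySem.List.insertBy (fun a b => decide (pvIKey a < pvIKey b)) x (ys.filter p)
        else ys.filter p := by
  induction ys with
  | nil => cases hp : p x <;> simp [PySem.List.insertBy, List.filter_cons, hp]
  | cons y ys ih =>
    rcases List.pairwise_cons.mp h with ⟨hy, hys⟩
    rw [show PySem.List.insertBy (fun a b => decide (pvIKey a < pvIKey b)) x (y :: ys)
        = if decide (pvIKey x < pvIKey y) then x :: y :: ys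
          else y :: PySem.List.insertBy (fun a b => decide (pvIKey a < pvIKey b)) x ys from rfl]
    by_cases hlt : pvIKey x < pvIKey y
    · rw [if_pos (decide_eq_true hlt)]
      cases hp : p x with
      | false => simp [List.filter_cons, hp]
      | true =>
        rw [if_pos rfl]
        rw [pv_insertBy_front x ((y :: ys).filter p) ?_]
        · simp [List.filter_cons, hp]
        · intro z hz
          rcases List.mem_cons.mp (List.mem_of_mem_filter hz) with rfl | hz'
          · exact hlt
          · exact lt_of_lt_of_le hlt (hy z hz')
    · rw [if_neg (by simpa using hlt)]
      rw [List.filter_cons, ih hys]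
      cases hp : p x with
      | false => simp [List.filter_cons]
      | true =>
        rw [if_pos rfl, if_pos rfl]
        cases hpy : p y with
        | false => simp [List.filter_cons, hpy]
        | true =>
          simp only [List.filter_cons, hpy, if_true]
          rw [show PySem.List.insertBy (fun a b => decide (pvIKey a < pvIKey b)) x (y :: ys.filter p)
              = if decide (pvIKey x < pvIKey y) then x :: y :: ys.filter p
                else y :: PySem.List.insertBy (fun a b => decide (pvIKey a < pvIKey b)) x (ys.filter p) from rfl,
            if_neg (by simpa using hlt)]

theorem pv_foldl_insertBy_filter (p : List (String × Int) → Bool)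
    (xs : List (List (String × Int))) :
    ∀ acc : List (List (String × Int)), acc.Pairwise (fun a b => pvIKey a ≤ pvIKey b) →
    ((xs.foldl (fun acc x => PySem.List.insertBy (fun a b => decide (pvIKey a < pvIKey b)) x acc) acc).filter p
      = (xs.filter p).foldl (fun acc x => PySem.List.insertBy (fun a b => decide (pvIKey a < pvIKey b)) x acc) (acc.filter p)) := by
  induction xs with
  | nil => intro acc _; rfl
  | cons x xs ih =>
    intro acc hacc
    rw [List.foldl_cons, ih _ (pv_pairwise_insertBy x acc hacc), pv_filter_insertBy p x acc hacc,
      List.filter_cons]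
    cases hp : p x <;> simp

-- the key lemma: a single stable sort then filter = filter then sort (per-bucket sort)
theorem pv_sorted_filter (p : List (String × Int) → Bool) (xs : List (List (String × Int))) :
    PySem.List.sorted (xs.filter p) pvIKey false
      = (PySem.List.sorted xs pvIKey false).filter p := by
  rw [PySem.List.sorted_eq_foldl_insertBy, PySem.List.sorted_eq_foldl_insertBy,
    pv_foldl_insertBy_filter p xs [] List.Pairwise.nil]
  rfl

theorem group_images_by_voice_py_eq (voice_segments image_requirements : List (List (String × Int))) :
    group_images_by_voice_py voice_segments image_requirements
      = group_images_by_voice_py_alt voice_segments image_requirements := by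
  unfold group_images_by_voice_py group_images_by_voice_py_alt
  -- A side
  rw [pv_foldA_eq]
  set d1 : PySem.Dict Int (List (List (String × Int))) :=
    image_requirements.foldl (fun d r => d.modify (pvVKey r) [] (fun l => l ++ [r])) PySem.Dict.empty with hd1
  have hk1 : d1.keys = PySem.Set.ofList (image_requirements.map pvVKey) := by
    rw [hd1, PySem.Dict.keys_foldl_modify_key image_requirements pvVKey []
      (fun _ r => fun l => l ++ [r]) PySem.Dict.empty, PySem.Dict.keys_empty]
    exact PySem.Set.update_empty _
  have hnd1 : d1.keys.Nodup := by
    rw [hk1]; exact PySem.Set.nodup_ofList _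
  have hg1 : ∀ c : Int, d1.getD c [] = image_requirements.filter (fun r => pvVKey r == c) := by
    intro c
    rw [hd1, pv_getD_append_fold, PySem.Dict.getD_empty, List.nil_append]
  set d2 : PySem.Dict Int (List (List (String × Int))) :=
    d1.keys.foldl (fun d voice_idx =>
      d.modify voice_idx [] (fun l => PySem.List.sorted l pvIKey false)) d1 with hd2
  have hk2 : d2.keys = d1.keys := by
    rw [hd2, PySem.Dict.keys_foldl_modify d1.keys []
      (fun _ _ => fun l => PySem.List.sorted l pvIKey false) d1,
      PySem.Set.update_eq_append_filter]
    have : (PySem.Set.ofList d1.keys).filter (fun y => !PySem.Set.contains d1.keys y) = [] := by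
      rw [List.filter_eq_nil_iff]
      intro a ha
      have : a ∈ d1.keys := (PySem.Set.mem_ofList _ _).mp ha
      simp [PySem.Set.contains_eq_listContains, this]
    rw [this, List.append_nil]
  have hnd2 : d2.keys.Nodup := by rw [hk2]; exact hnd1
  have hg2 : ∀ c ∈ d1.keys, d2.getD c []
      = PySem.List.sorted (image_requirements.filter (fun r => pvVKey r == c)) pvIKey false := by
    intro c hc
    rw [hd2, pv_getD_sort_fold_mem' _ d1.keys d1 c hnd1 hc, hg1]
  -- B side
  set d0 : PySem.Dict Int (List (List (String × Int))) :=
    image_requirements.foldl (fun d r => d.insert (pvVKey r) []) PySem.Dict.empty with hd0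
  have hk0 : d0.keys = PySem.Set.ofList (image_requirements.map pvVKey) := by
    rw [hd0, PySem.Dict.keys_foldl_insert_key image_requirements pvVKey (fun _ _ => []) PySem.Dict.empty,
      PySem.Dict.keys_empty]
    exact PySem.Set.update_empty _
  have hnd0 : d0.keys.Nodup := by rw [hk0]; exact PySem.Set.nodup_ofList _
  set dB : PySem.Dict Int (List (List (String × Int))) :=
    (PySem.List.sorted image_requirements pvIKey false).foldl
      (fun d r => d.modify (pvVKey r) [] (fun l => l ++ [r])) d0 with hdB
  have hkB : dB.keys = d0.keys := by
    rw [hdB, PySem.Dict.keys_foldl_modify_key (PySem.List.sorted image_requirements pvIKey false)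
      pvVKey [] (fun _ r => fun l => l ++ [r]) d0, PySem.Set.update_eq_append_filter]
    have : (PySem.Set.ofList ((PySem.List.sorted image_requirements pvIKey false).map pvVKey)).filter
        (fun y => !PySem.Set.contains d0.keys y) = [] := by
      rw [List.filter_eq_nil_iff]
      intro a ha
      have ha' : a ∈ (PySem.List.sorted image_requirements pvIKey false).map pvVKey :=
        (PySem.Set.mem_ofList _ _).mp ha
      rcases List.mem_map.mp ha' with ⟨r, hr, rfl⟩
      have hrm : r ∈ image_requirements := (PySem.List.mem_sorted _ _ _ _).mp hr
      have : pvVKey r ∈ d0.keys := by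
        rw [hk0]
        exact (PySem.Set.mem_ofList _ _).mpr (List.mem_map_of_mem hrm)
      simp [PySem.Set.contains_eq_listContains, this]
    rw [this, List.append_nil]
  have hndB : dB.keys.Nodup := by rw [hkB]; exact hnd0
  have hgB : ∀ c : Int, dB.getD c []
      = (PySem.List.sorted image_requirements pvIKey false).filter (fun r => pvVKey r == c) := by
    intro c
    rw [hdB, pv_getD_append_fold, hd0,
      pv_getD_insert_fold_nil image_requirements PySem.Dict.empty c (PySem.Dict.getD_empty c []),
      List.nil_append]
  -- assemble: both items lists are the same map over the same key list
  rw [PySem.Dict.items_eq_map_keys d2 hnd2 [], PySem.Dict.items_eq_map_keys dB hndB [], hk2, hkB,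
    hk0, hk1]
  apply List.map_congr_left
  intro k hk
  have hkmem : k ∈ d1.keys := by rw [hk1]; exact hk
  rw [hg2 k hkmem, hgB k, pv_sorted_filter]

-- ===== VERDICT (by name: the statement is the Claim_ definition above) =====
theorem group_images_by_voice_py_spec : Claim_equal_group_images_by_voice_py := by
  intro voice_segments image_requirements _
  exact group_images_by_voice_py_eq voice_segments image_requirements
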